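-- pv_equiv track=rewrite | github.com/charles-wangkai/rosalind | nwc.py | has_negative_weight_cycle
-- ===== SOURCE A (Python) =====
-- def relax(min_dists, edges):
--     changed = False
--     for from_v, to_v, weight in edges:
--         if min_dists[from_v] != None and (min_dists[to_v] == None or min_dists[to_v] > min_dists[from_v] + weight):
--             min_dists[to_v] = min_dists[from_v] + weight
--             changed = True
--     return changed
--
-- def has_negative_weight_cycle_from_source(n, edges, source):
--     min_dists = [None] * n
--     min_dists[source] = 0
--
--     for _ in range(n - 1):
--         relax(min_dists, edges)
--
--     return relax(min_dists, edges), set(filter(lambda v: min_dists[v] != None, range(n)))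
--
-- def has_negative_weight_cycle(n, edges):
--     sources = set(range(n))
--     while sources:
--         source = next(iter(sources))
--         negative_weight_cycle, reachable_vertices = has_negative_weight_cycle_from_source(n, edges, source)
--
--         if negative_weight_cycle:
--             return True
--
--         sources -= reachable_vertices
--         edges = list(filter(lambda edge: edge[0] not in reachable_vertices and edge[1] not in reachable_vertices, edges))
--     return False
-- ===== SOURCE B (Python) =====
-- def _relax_pass(dist, edges):
--     changed = False
--     for u, v, w in edges:
--         d = dist[u] + w
--         if d < dist[v]:
--             dist[v] = d
--             changed = True
--     return changed
--
-- def has_negative_weight_cycle(n, edges):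
--     # One Bellman-Ford sweep from an implicit super-source: every vertex
--     # starts at distance 0, so every vertex is "reachable" at once.
--     if n <= 0:
--         return False  # no vertices: there is no cycle to find
--     dist = [0] * n
--     for _ in range(n - 1):
--         if not _relax_pass(dist, edges):
--             return False
--     return _relax_pass(dist, edges)
-- ===== Notes on version B (the rewrite author's own statement) =====
-- stated objective: faster
-- what changed: A reruns Bellman-Ford from every not-yet-reached vertex, re-filtering the edge list between runs; B runs a single Bellman-Ford sweep with every distance initialised to 0 (an implicit super-source reaching all vertices), with an early exit as soon as a pass changes nothing.
import Mathlib
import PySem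

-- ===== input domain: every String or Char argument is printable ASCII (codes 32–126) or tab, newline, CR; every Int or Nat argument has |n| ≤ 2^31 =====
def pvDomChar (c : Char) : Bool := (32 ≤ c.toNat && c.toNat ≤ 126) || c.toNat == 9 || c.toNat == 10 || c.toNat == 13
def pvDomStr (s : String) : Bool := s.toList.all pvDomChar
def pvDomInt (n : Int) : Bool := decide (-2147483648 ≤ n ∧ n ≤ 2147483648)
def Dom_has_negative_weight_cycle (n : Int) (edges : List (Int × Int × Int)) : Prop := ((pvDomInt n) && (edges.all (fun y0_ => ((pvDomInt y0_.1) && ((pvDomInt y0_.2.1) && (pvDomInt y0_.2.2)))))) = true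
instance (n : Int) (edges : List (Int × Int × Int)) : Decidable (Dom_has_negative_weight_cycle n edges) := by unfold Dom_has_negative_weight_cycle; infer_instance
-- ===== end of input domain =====

-- B replaces A's per-source Bellman-Ford restart loop by ONE Bellman-Ford sweep whose
-- distances all start at 0 (an implicit super-source), with an early exit when a pass
-- changes nothing; the proof shows both return true exactly on graphs with a
-- negative-weight cycle.


-- ===== PORT A =====
-- Python 'relax(min_dists, edges)': sequential in-place relaxation over the edge list;
-- indexing min_dists[i] / assignment via pyGetD/pySetD (IndexError inputs are excluded by Pre_).
def pyRelax : List (Int × Int × Int) → List (Option Int) → Bool → List (Option Int) × Bool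
  | [], d, c => (d, c)
  | (f, t, w) :: es, d, c =>
    match PySem.List.pyGetD d f none with
    | none => pyRelax es d c
    | some a =>
      match PySem.List.pyGetD d t none with
      | none => pyRelax es (PySem.List.pySetD d t (some (a + w))) true
      | some b =>
        if a + w < b then pyRelax es (PySem.List.pySetD d t (some (a + w))) true
        else pyRelax es d c

-- 'for _ in range(n - 1): relax(min_dists, edges)'
def pyRounds : Nat → List (Option Int) → List (Int × Int × Int) → List (Option Int)
  | 0, d, _ => d
  | k + 1, d, es => pyRounds k (pyRelax es d false).1 es

-- Python 'has_negative_weight_cycle_from_source': note the reachable set is computed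
-- AFTER the final (n-th) relax call, exactly as the Python tuple evaluates.
def pyFromSource (n : Int) (edges : List (Int × Int × Int)) (source : Int) : Bool × List Int :=
  let d0 := PySem.List.pySetD (List.replicate n.toNat (none : Option Int)) source (some 0)
  let d := pyRounds (n - 1).toNat d0 edges
  let r := pyRelax edges d false
  (r.2, (PySem.List.pyRange 0 n 1).filter (fun v => (PySem.List.pyGetD r.1 v none).isSome))

-- Python 'while sources:' loop.  'sources = set(range(n))' with in-place difference of
-- subsets of range(n): CPython iterates such a small-int set in increasing numeric order,
-- so 'next(iter(sources))' is the least remaining source; the port keeps the sources as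
-- the ordered (duplicate-free) list and takes its head.  The fuel argument only makes the
-- recursion structural: it starts at len(sources) and each iteration removes at least the
-- chosen source, so fuel never runs out.
def pyLoopA : Nat → Int → List (Int × Int × Int) → List Int → Bool
  | 0, _, _, _ => false
  | _ + 1, _, _, [] => false
  | fuel + 1, n, edges, s :: rest =>
    let r := pyFromSource n edges s
    if r.1 then true
    else pyLoopA fuel n (edges.filter fun e => !(r.2.contains e.1) && !(r.2.contains e.2.1))
        ((s :: rest).filter fun v => !(r.2.contains v))

def has_negative_weight_cycle (n : Int) (edges : List (Int × Int × Int)) : Bool :=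
  pyLoopA n.toNat n edges (PySem.List.pyRange 0 n 1)

-- ===== PORT B =====
-- Source B '_relax_pass(dist, edges)'
def pyPass : List (Int × Int × Int) → List Int → Bool → List Int × Bool
  | [], d, c => (d, c)
  | (u, v, w) :: es, d, c =>
    let x := PySem.List.pyGetD d u 0 + w
    if x < PySem.List.pyGetD d v 0 then pyPass es (PySem.List.pySetD d v x) true
    else pyPass es d c

-- Source B main loop: n-1 early-exiting passes, then the result of one more pass.
def pyLoopB : Nat → List Int → List (Int × Int × Int) → Bool
  | 0, d, es => (pyPass es d false).2
  | k + 1, d, es =>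
    let r := pyPass es d false
    if r.2 then pyLoopB k r.1 es else false

def has_negative_weight_cycle_alt (n : Int) (edges : List (Int × Int × Int)) : Bool :=
  if n ≤ 0 then false  -- no vertices: there is no cycle to find
  else pyLoopB (n - 1).toNat (List.replicate n.toNat 0) edges

-- ===== PRECONDITION & SPEC =====
-- Pre_ is exactly A's return domain: for n ≥ 1 Python A raises IndexError whenever an
-- edge endpoint lies outside [-n, n) (every pass indexes every edge), and for n ≤ 0 the
-- source loop never runs, so A returns on any edge list.
def Pre_has_negative_weight_cycle (n : Int) (edges : List (Int × Int × Int)) : Prop :=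
  n ≤ 0 ∨ ∀ e ∈ edges, -n ≤ e.1 ∧ e.1 < n ∧ -n ≤ e.2.1 ∧ e.2.1 < n
instance (n : Int) (edges : List (Int × Int × Int)) : Decidable (Pre_has_negative_weight_cycle n edges) := by unfold Pre_has_negative_weight_cycle; infer_instance

def pvWitness_has_negative_weight_cycle : Int × (List (Int × Int × Int)) :=
  (2, [(0, 1, -5), (1, 0, 2)])

def Spec_has_negative_weight_cycle (n : Int) (edges : List (Int × Int × Int)) (out : Bool) : Prop := out = has_negative_weight_cycle_alt n edges
instance (n : Int) (edges : List (Int × Int × Int)) (out : Bool) : Decidable (Spec_has_negative_weight_cycle n edges out) := by unfold Spec_has_negative_weight_cycle; infer_instance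

-- ===== CLAIM (what is proved, stated in full; the proofs are below) =====
def Claim_equal_has_negative_weight_cycle : Prop := ∀ (n : Int) (edges : List (Int × Int × Int)), Dom_has_negative_weight_cycle n edges → Pre_has_negative_weight_cycle n edges → Spec_has_negative_weight_cycle n edges (has_negative_weight_cycle n edges)

-- ===== LEMMAS AND PROOFS =====

-- ---- proof-side normalized (Nat-indexed) model ----

/-- The vertex a (possibly negative, in-range) Python index denotes. -/
def pvNi (n i : Int) : Nat := (if i < 0 then i + n else i).toNat

def pvNrm (n : Int) (e : Int × Int × Int) : Nat × Nat × Int := (pvNi n e.1, pvNi n e.2.1, e.2.2)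

/-- Distance of vertex `v` (out of range = none = ∞). -/
def pvG (d : List (Option Int)) (v : Nat) : Option Int := d.getD v none

/-- Clean sequential relaxation pass over normalized edges. -/
def pvPass : List (Nat × Nat × Int) → List (Option Int) → Bool → List (Option Int) × Bool
  | [], d, c => (d, c)
  | (u, v, w) :: es, d, c =>
    match pvG d u with
    | none => pvPass es d c
    | some a =>
      match pvG d v with
      | none => pvPass es (d.set v (some (a + w))) true
      | some b => if a + w < b then pvPass es (d.set v (some (a + w))) true else pvPass es d c

def pvRounds : Nat → List (Option Int) → List (Nat × Nat × Int) → List (Option Int)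
  | 0, d, _ => d
  | k + 1, d, es => pvRounds k (pvPass es d false).1 es

def PvFire (d : List (Option Int)) (e : Nat × Nat × Int) : Prop :=
  match pvG d e.1 with
  | none => False
  | some a =>
    match pvG d e.2.1 with
    | none => True
    | some b => a + e.2.2 < b

/-- `a ≤ b` on distances with `none = ∞`. -/
def PvOle : Option Int → Option Int → Prop
  | _, none => True
  | none, some _ => False
  | some x, some y => x ≤ y

def PvWalk (E : List (Nat × Nat × Int)) : Nat → List (Nat × Nat × Int) → Nat → Prop
  | u, [], v => u = v
  | u, e :: p, v => e ∈ E ∧ e.1 = u ∧ PvWalk E e.2.1 p v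

def pvWt (p : List (Nat × Nat × Int)) : Int := (p.map (fun e => e.2.2)).sum

def PvNegCyc (E : List (Nat × Nat × Int)) : Prop :=
  ∃ x c, c ≠ [] ∧ PvWalk E x c x ∧ pvWt c < 0

def pvVtx (p : List (Nat × Nat × Int)) : List Nat := p.map (fun e => e.2.1)


-- ---- basic distance-array lemmas ----

theorem pvG_set_self {d : List (Option Int)} {v : Nat} (h : v < d.length) (x : Option Int) :
    pvG (d.set v x) v = x := by
  simp [pvG, List.getD, h]

theorem pvG_set_ne {d : List (Option Int)} {v v' : Nat} (h : v' ≠ v) (x : Option Int) :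
    pvG (d.set v x) v' = pvG d v' := by
  simp [pvG, List.getD, List.getElem?_set_ne (Ne.symm h)]

theorem pvPass_length : ∀ (es : List (Nat × Nat × Int)) (d : List (Option Int)) (c : Bool),
    (pvPass es d c).1.length = d.length := by
  intro es
  induction es with
  | nil => intro d c; rfl
  | cons e es ih =>
    intro d c
    obtain ⟨u, v, w⟩ := e
    simp only [pvPass]
    cases hu : pvG d u with
    | none => exact ih d c
    | some a =>
      cases hv : pvG d v with
      | none => rw [ih]; simp
      | some b =>
        by_cases hlt : a + w < b
        · simp only [if_pos hlt]; rw [ih]; simp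
        · simp only [if_neg hlt]; exact ih d c

theorem pvRounds_length : ∀ (k : Nat) (d : List (Option Int)) (es : List (Nat × Nat × Int)),
    (pvRounds k d es).length = d.length := by
  intro k
  induction k with
  | zero => intro d es; rfl
  | succ k ih => intro d es; rw [pvRounds, ih, pvPass_length]

theorem pvPass_snd_true : ∀ (es : List (Nat × Nat × Int)) (d : List (Option Int)),
    (pvPass es d true).2 = true := by
  intro es
  induction es with
  | nil => intro d; rfl
  | cons e es ih =>
    intro d
    obtain ⟨u, v, w⟩ := e
    simp only [pvPass]
    cases hu : pvG d u with
    | none => exact ih d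
    | some a =>
      cases hv : pvG d v with
      | none => exact ih _
      | some b =>
        by_cases hlt : a + w < b
        · simp only [if_pos hlt]; exact ih _
        · simp only [if_neg hlt]; exact ih d

theorem pvPass_of_stable : ∀ (es : List (Nat × Nat × Int)) (d : List (Option Int)) (c : Bool),
    (∀ e ∈ es, ¬ PvFire d e) → pvPass es d c = (d, c) := by
  intro es
  induction es with
  | nil => intro d c _; rfl
  | cons e es ih =>
    intro d c h
    obtain ⟨u, v, w⟩ := e
    have he := h (u, v, w) (by simp)
    simp only [pvPass]
    cases hu : pvG d u with
    | none => exact ih d c (fun e he' => h e (by simp [he']))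
    | some a =>
      cases hv : pvG d v with
      | none => exact absurd (by simp [PvFire, hu, hv]) he
      | some b =>
        have hnlt : ¬ a + w < b := by
          intro hlt; exact he (by simp [PvFire, hu, hv]; exact hlt)
        simp only [if_neg hnlt]
        exact ih d c (fun e he' => h e (by simp [he']))

theorem pvPass_false_elim : ∀ (es : List (Nat × Nat × Int)) (d : List (Option Int)) (c : Bool),
    (pvPass es d c).2 = false →
    (pvPass es d c).1 = d ∧ c = false ∧ ∀ e ∈ es, ¬ PvFire d e := by
  intro es
  induction es with
  | nil =>
    intro d c h
    exact ⟨rfl, h, by simp⟩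
  | cons e es ih =>
    intro d c h
    obtain ⟨u, v, w⟩ := e
    simp only [pvPass] at h
    cases hu : pvG d u with
    | none =>
      rw [hu] at h
      obtain ⟨h1, h2, h3⟩ := ih d c h
      refine ⟨by simp only [pvPass, hu]; exact h1, h2, ?_⟩
      intro e he
      rcases List.mem_cons.mp he with rfl | he'
      · simp [PvFire, hu]
      · exact h3 e he'
    | some a =>
      rw [hu] at h
      cases hv : pvG d v with
      | none => rw [hv] at h; simp only at h; rw [pvPass_snd_true] at h; exact absurd h (by simp)
      | some b =>
        rw [hv] at h; simp only at h
        by_cases hlt : a + w < b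
        · rw [if_pos hlt, pvPass_snd_true] at h; exact absurd h (by simp)
        · rw [if_neg hlt] at h
          obtain ⟨h1, h2, h3⟩ := ih d c h
          refine ⟨by simp only [pvPass, hu, hv, if_neg hlt]; exact h1, h2, ?_⟩
          intro e he
          rcases List.mem_cons.mp he with rfl | he'
          · simp only [PvFire, hu, hv]; exact hlt
          · exact h3 e he'

-- ---- order on optional distances ----

theorem pvOle_refl (a : Option Int) : PvOle a a := by cases a <;> simp [PvOle]

theorem pvOle_trans {a b c : Option Int} (h1 : PvOle a b) (h2 : PvOle b c) : PvOle a c := by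
  cases a <;> cases b <;> cases c <;> simp_all [PvOle] <;> omega

theorem pvOle_some_elim {a : Option Int} {y : Int} (h : PvOle a (some y)) :
    ∃ x, a = some x ∧ x ≤ y := by
  cases a with
  | none => exact absurd h (by simp [PvOle])
  | some x => exact ⟨x, rfl, h⟩

theorem pvOle_map_add {a b : Option Int} (w : Int) (h : PvOle a b) :
    PvOle (a.map (· + w)) (b.map (· + w)) := by
  cases a <;> cases b <;> simp_all [PvOle]

theorem pvPass_mono : ∀ (es : List (Nat × Nat × Int)) (d : List (Option Int)) (c : Bool) (v : Nat),
    PvOle (pvG (pvPass es d c).1 v) (pvG d v) := by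
  intro es
  induction es with
  | nil => intro d c v; exact pvOle_refl _
  | cons e es ih =>
    intro d c v'
    obtain ⟨u, v, w⟩ := e
    simp only [pvPass]
    cases hu : pvG d u with
    | none => exact ih d c v'
    | some a =>
      have hset : ∀ x : Int, (pvG d v = none ∨ ∃ b, pvG d v = some b ∧ x ≤ b) →
          PvOle (pvG (pvPass es (d.set v (some x)) true).1 v') (pvG d v') := by
        intro x hx
        refine pvOle_trans (ih _ true v') ?_
        by_cases hvv : v' = v
        · subst hvv
          by_cases hlen : v' < d.length
          · rw [pvG_set_self hlen]
            rcases hx with h0 | ⟨b, hb, hxb⟩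
            · rw [h0]; simp [PvOle]
            · rw [hb]; simpa [PvOle] using hxb
          · rw [List.set_eq_of_length_le (by omega)]; exact pvOle_refl _
        · rw [pvG_set_ne hvv]; exact pvOle_refl _
      cases hv : pvG d v with
      | none => exact hset (a + w) (Or.inl hv)
      | some b =>
        simp only
        by_cases hlt : a + w < b
        · rw [if_pos hlt]; exact hset (a + w) (Or.inr ⟨b, hv, by omega⟩)
        · rw [if_neg hlt]; exact ih d c v'

theorem pvRounds_mono : ∀ (k : Nat) (d : List (Option Int)) (es : List (Nat × Nat × Int)) (v : Nat),
    PvOle (pvG (pvRounds k d es) v) (pvG d v) := by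
  intro k
  induction k with
  | zero => intro d es v; exact pvOle_refl _
  | succ k ih =>
    intro d es v
    exact pvOle_trans (ih _ es v) (pvPass_mono es d false v)


-- ---- one pass improves past every edge ----

theorem pvPass_bound : ∀ (es : List (Nat × Nat × Int)) (d : List (Option Int)) (c : Bool)
    (e : Nat × Nat × Int), e ∈ es → e.2.1 < d.length →
    PvOle (pvG (pvPass es d c).1 e.2.1) ((pvG d e.1).map (· + e.2.2)) := by
  intro es
  induction es with
  | nil => intro d c e he _; exact absurd he (by simp)
  | cons e0 es ih =>
    intro d c e he hlen
    rcases List.mem_cons.mp he with rfl | htl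
    · -- the head edge is e itself
      obtain ⟨u, v, w⟩ := e
      simp only [pvPass]
      cases hu : pvG d u with
      | none => simp [PvOle]
      | some a =>
        simp only at hlen ⊢
        have hres : ∀ (c' : Bool), PvOle (pvG (pvPass es (d.set v (some (a + w))) c').1 v) (some (a + w)) := by
          intro c'
          refine pvOle_trans (pvPass_mono es _ c' v) ?_
          rw [pvG_set_self hlen]
          exact pvOle_refl _
        cases hv : pvG d v with
        | none => simpa [hu] using hres true
        | some b =>
          simp only
          by_cases hlt : a + w < b
          · rw [if_pos hlt]; simpa [hu] using hres true
          · rw [if_neg hlt]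
            refine pvOle_trans (pvPass_mono es d c v) ?_
            rw [hv]
            simpa [PvOle] using le_of_not_gt hlt
    · -- e is in the tail: one step, then the IH, with monotonicity of the source value
      obtain ⟨u, v, w⟩ := e0
      simp only [pvPass]
      have hstep : ∀ d' : List (Option Int), d'.length = d.length →
          (∀ z : Nat, PvOle (pvG d' z) (pvG d z)) →
          PvOle (pvG (pvPass es d' true).1 e.2.1) ((pvG d e.1).map (· + e.2.2)) := by
        intro d' hl hmono
        refine pvOle_trans (ih d' true e htl (by omega)) ?_
        exact pvOle_map_add _ (hmono e.1)
      cases hu : pvG d u with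
      | none => exact ih d c e htl hlen
      | some a =>
        have hmono : ∀ x : Int, (pvG d v = none ∨ ∃ b, pvG d v = some b ∧ x ≤ b) →
            ∀ z : Nat, PvOle (pvG (d.set v (some x)) z) (pvG d z) := by
          intro x hx z
          by_cases hzv : z = v
          · subst hzv
            by_cases hl : z < d.length
            · rw [pvG_set_self hl]
              rcases hx with h0 | ⟨b, hb, hxb⟩
              · rw [h0]; simp [PvOle]
              · rw [hb]; simpa [PvOle] using hxb
            · rw [List.set_eq_of_length_le (by omega)]; exact pvOle_refl _
          · rw [pvG_set_ne hzv]; exact pvOle_refl _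
        cases hv : pvG d v with
        | none =>
          exact hstep _ (by simp) (hmono (a + w) (Or.inl hv))
        | some b =>
          simp only
          by_cases hlt : a + w < b
          · rw [if_pos hlt]
            exact hstep _ (by simp) (hmono (a + w) (Or.inr ⟨b, hv, by omega⟩))
          · rw [if_neg hlt]; exact ih d c e htl hlen

theorem pvRounds_succ' (k : Nat) (d : List (Option Int)) (es : List (Nat × Nat × Int)) :
    pvRounds (k + 1) d es = (pvPass es (pvRounds k d es) false).1 := by
  induction k generalizing d with
  | zero => rfl
  | succ k ih => rw [pvRounds, ih, pvRounds]

-- ---- walks ----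

theorem pvWalk_append {E : List (Nat × Nat × Int)} :
    ∀ (p q : List (Nat × Nat × Int)) (u m v : Nat),
    PvWalk E u p m → PvWalk E m q v → PvWalk E u (p ++ q) v := by
  intro p
  induction p with
  | nil => intro q u m v h1 h2; cases h1; simpa using h2
  | cons e p ih =>
    intro q u m v h1 h2
    obtain ⟨he, hu, hw⟩ := h1
    exact ⟨he, hu, ih q _ m v hw h2⟩

theorem pvWalk_append_elim {E : List (Nat × Nat × Int)} :
    ∀ (p q : List (Nat × Nat × Int)) (u v : Nat),
    PvWalk E u (p ++ q) v → ∃ m, PvWalk E u p m ∧ PvWalk E m q v := by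
  intro p
  induction p with
  | nil => intro q u v h; exact ⟨u, rfl, h⟩
  | cons e p ih =>
    intro q u v h
    obtain ⟨he, hu, hw⟩ := h
    obtain ⟨m, h1, h2⟩ := ih q _ v hw
    exact ⟨m, ⟨he, hu, h1⟩, h2⟩

theorem pvWalk_single {E : List (Nat × Nat × Int)} {e : Nat × Nat × Int} (he : e ∈ E) :
    PvWalk E e.1 [e] e.2.1 := ⟨he, rfl, rfl⟩

theorem pvWalk_subset {E E' : List (Nat × Nat × Int)} (hsub : ∀ e ∈ E, e ∈ E') :
    ∀ (p : List (Nat × Nat × Int)) (u v : Nat), PvWalk E u p v → PvWalk E' u p v := by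
  intro p
  induction p with
  | nil => intro u v h; exact h
  | cons e p ih =>
    intro u v h
    obtain ⟨he, hu, hw⟩ := h
    exact ⟨hsub e he, hu, ih _ v hw⟩

theorem pvWalk_edge_mem {E : List (Nat × Nat × Int)} :
    ∀ (p : List (Nat × Nat × Int)) (u v : Nat), PvWalk E u p v → ∀ e ∈ p, e ∈ E := by
  intro p
  induction p with
  | nil => intro u v _ e he; exact absurd he (by simp)
  | cons e0 p ih =>
    intro u v h e he
    obtain ⟨he0, _, hw⟩ := h
    rcases List.mem_cons.mp he with rfl | htl
    · exact he0
    · exact ih _ v hw e htl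

@[simp] theorem pvWt_nil : pvWt [] = 0 := rfl
@[simp] theorem pvWt_cons (e : Nat × Nat × Int) (p : List (Nat × Nat × Int)) :
    pvWt (e :: p) = e.2.2 + pvWt p := by simp [pvWt]
@[simp] theorem pvWt_append (p q : List (Nat × Nat × Int)) :
    pvWt (p ++ q) = pvWt p + pvWt q := by simp [pvWt]

theorem pvNegCyc_subset {E E' : List (Nat × Nat × Int)} (hsub : ∀ e ∈ E, e ∈ E')
    (h : PvNegCyc E) : PvNegCyc E' := by
  obtain ⟨x, c, hne, hw, hlt⟩ := h
  exact ⟨x, c, hne, pvWalk_subset hsub c x x hw, hlt⟩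

-- ---- after k rounds, every start-rooted walk of length ≤ k bounds the distance ----

theorem pvUpper_bound {E : List (Nat × Nat × Int)} {d0 : List (Option Int)} {s : Nat}
    (hT : ∀ e ∈ E, e.2.1 < d0.length) (hs : pvG d0 s = some 0) :
    ∀ (k : Nat) (p : List (Nat × Nat × Int)) (v : Nat),
    PvWalk E s p v → p.length ≤ k → PvOle (pvG (pvRounds k d0 E) v) (some (pvWt p)) := by
  intro k
  induction k with
  | zero =>
    intro p v hw hl
    have : p = [] := List.length_eq_zero_iff.mp (Nat.le_zero.mp hl)
    subst this
    cases hw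
    rw [pvRounds]
    rw [hs]
    simp [PvOle]
  | succ k ih =>
    intro p v hw hl
    rcases List.eq_nil_or_concat p with rfl | ⟨q, e, rfl⟩
    · cases hw
      refine pvOle_trans (pvRounds_mono (k + 1) d0 E s) ?_
      rw [hs]; simp [PvOle]
    · rw [List.concat_eq_append] at hw hl ⊢
      obtain ⟨m, hq, he⟩ := pvWalk_append_elim q [e] s v hw
      obtain ⟨heE, heu, hev⟩ := he
      have hev' : e.2.1 = v := hev
      subst hev'
      rw [pvRounds_succ']
      have hb := pvPass_bound E (pvRounds k d0 E) false e heE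
        (by rw [pvRounds_length]; exact hT e heE)
      rw [heu] at hb
      have hq' : PvOle (pvG (pvRounds k d0 E) m) (some (pvWt q)) := by
        refine ih q m hq ?_
        simp at hl; omega
      refine pvOle_trans hb ?_
      refine pvOle_trans (pvOle_map_add e.2.2 hq') ?_
      simp [PvOle, pvWt]

-- ---- every finite distance is the weight of a walk from a 0-initialised vertex ----

def PvWInv (E : List (Nat × Nat × Int)) (d0 d : List (Option Int)) : Prop :=
  ∀ v a, pvG d v = some a → ∃ s p, pvG d0 s = some 0 ∧ PvWalk E s p v ∧ pvWt p = a

theorem pvWInv_init {E : List (Nat × Nat × Int)} {d0 : List (Option Int)}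
    (h : ∀ v, pvG d0 v = none ∨ pvG d0 v = some 0) : PvWInv E d0 d0 := by
  intro v a ha
  rcases h v with h0 | h0
  · rw [ha] at h0; cases h0
  · rw [ha] at h0
    exact ⟨v, [], by rw [ha, h0], rfl, by simpa [pvWt] using (Option.some_inj.mp h0).symm⟩

theorem pvWInv_pass {E es : List (Nat × Nat × Int)} {d0 : List (Option Int)}
    (hsub : ∀ e ∈ es, e ∈ E) :
    ∀ (d : List (Option Int)) (c : Bool), PvWInv E d0 d → PvWInv E d0 (pvPass es d c).1 := by
  induction es with
  | nil => intro d c h; exact h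
  | cons e0 es ih =>
    intro d c h
    obtain ⟨u, v, w⟩ := e0
    have hmem : (u, v, w) ∈ E := hsub _ (by simp)
    have hsub' : ∀ e ∈ es, e ∈ E := fun e he => hsub e (by simp [he])
    simp only [pvPass]
    cases hu : pvG d u with
    | none => exact ih hsub' d c h
    | some a =>
      have hupd : PvWInv E d0 (d.set v (some (a + w))) := by
        intro v' a' ha'
        by_cases hvv : v' = v
        · subst hvv
          by_cases hl : v' < d.length
          · rw [pvG_set_self hl] at ha'
            obtain ⟨s, p, hs0, hwp, hwt⟩ := h u a hu
            refine ⟨s, p ++ [(u, v', w)], hs0, ?_, ?_⟩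
            · exact pvWalk_append p [(u, v', w)] s u v' hwp (pvWalk_single hmem)
            · obtain rfl : a + w = a' := Option.some_inj.mp ha'
              simp [hwt]
          · rw [List.set_eq_of_length_le (by omega)] at ha'
            exact h v' a' ha'
        · rw [pvG_set_ne hvv] at ha'
          exact h v' a' ha'
      cases hv : pvG d v with
      | none => exact ih hsub' _ true hupd
      | some b =>
        simp only
        by_cases hlt : a + w < b
        · rw [if_pos hlt]; exact ih hsub' _ true hupd
        · rw [if_neg hlt]; exact ih hsub' d c h

theorem pvWInv_rounds {E : List (Nat × Nat × Int)} {d0 : List (Option Int)}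
    (h0 : ∀ v, pvG d0 v = none ∨ pvG d0 v = some 0) :
    ∀ (k : Nat), PvWInv E d0 (pvRounds k d0 E) := by
  have base := pvWInv_init (E := E) h0
  intro k
  induction k with
  | zero => exact base
  | succ k ih =>
    rw [pvRounds_succ']
    exact pvWInv_pass (fun e he => he) _ false ih


-- ---- stable distances are a potential: no reachable negative cycle ----

theorem pvPotential {E : List (Nat × Nat × Int)} {d : List (Option Int)}
    (hstb : ∀ e ∈ E, ¬ PvFire d e) :
    ∀ (p : List (Nat × Nat × Int)) (u v : Nat), PvWalk E u p v →
    ∀ a, pvG d u = some a → ∃ b, pvG d v = some b ∧ b ≤ a + pvWt p := by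
  intro p
  induction p with
  | nil =>
    intro u v hw a ha
    cases hw
    exact ⟨a, ha, by simp⟩
  | cons e p ih =>
    intro u v hw a ha
    obtain ⟨he, hu, hw'⟩ := hw
    have hnf := hstb e he
    rw [PvFire, hu, ha] at hnf
    cases hm : pvG d e.2.1 with
    | none => rw [hm] at hnf; exact absurd trivial hnf
    | some b' =>
      rw [hm] at hnf
      have hb' : b' ≤ a + e.2.2 := by simpa using le_of_not_gt hnf
      obtain ⟨b, hb, hble⟩ := ih e.2.1 v hw' b' hm
      exact ⟨b, hb, by simp [pvWt] at *; omega⟩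

theorem pvCycle_nonneg {E : List (Nat × Nat × Int)} {d : List (Option Int)}
    (hstb : ∀ e ∈ E, ¬ PvFire d e) {x : Nat} {c : List (Nat × Nat × Int)} {a : Int}
    (hw : PvWalk E x c x) (ha : pvG d x = some a) : 0 ≤ pvWt c := by
  obtain ⟨b, hb, hble⟩ := pvPotential hstb c x x hw a ha
  rw [ha] at hb
  obtain rfl : a = b := Option.some_inj.mp hb
  omega

@[simp] theorem pvVtx_nil : pvVtx [] = [] := rfl
@[simp] theorem pvVtx_cons (e : Nat × Nat × Int) (p : List (Nat × Nat × Int)) :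
    pvVtx (e :: p) = e.2.1 :: pvVtx p := rfl

-- ---- pigeonhole on vertex traces ----

theorem pvNodup_length_le {N : Nat} : ∀ (l : List Nat), (∀ x ∈ l, x < N) → l.Nodup →
    l.length ≤ N := by
  intro l hlt hnd
  have h1 : l.toFinset.card = l.length := List.toFinset_card_of_nodup hnd
  have h2 : l.toFinset ⊆ Finset.range N := by
    intro x hx
    simp only [Finset.mem_range]
    exact hlt x (List.mem_toFinset.mp hx)
  have := Finset.card_le_card h2
  simpa [h1] using this

theorem pvNot_nodup_split : ∀ (l : List Nat), ¬ l.Nodup →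
    ∃ l1 x l2 l3, l = l1 ++ x :: l2 ++ x :: l3 := by
  intro l
  induction l with
  | nil => intro h; exact absurd List.nodup_nil h
  | cons a t ih =>
    intro h
    by_cases ht : t.Nodup
    · have hat : a ∈ t := by
        by_contra hna
        exact h (List.nodup_cons.mpr ⟨hna, ht⟩)
      obtain ⟨l2, l3, rfl⟩ := List.mem_iff_append.mp hat
      exact ⟨[], a, l2, l3, rfl⟩
    · obtain ⟨l1, x, l2, l3, rfl⟩ := ih ht
      exact ⟨a :: l1, x, l2, l3, rfl⟩

theorem pvWalk_trace_split {E : List (Nat × Nat × Int)} :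
    ∀ (l1 : List Nat) (x : Nat) (r : List Nat) (u v : Nat) (p : List (Nat × Nat × Int)),
    PvWalk E u p v → u :: pvVtx p = l1 ++ x :: r →
    ∃ p1 p2, p = p1 ++ p2 ∧ p1.length = l1.length ∧
      PvWalk E u p1 x ∧ PvWalk E x p2 v ∧ pvVtx p2 = r := by
  intro l1
  induction l1 with
  | nil =>
    intro x r u v p hw heq
    simp only [List.nil_append, List.cons.injEq] at heq
    obtain ⟨rfl, hr⟩ := heq
    exact ⟨[], p, rfl, rfl, rfl, hw, hr⟩
  | cons a l1 ih =>
    intro x r u v p hw heq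
    simp only [List.cons_append, List.cons.injEq] at heq
    obtain ⟨rfl, hr⟩ := heq
    cases p with
    | nil => simp [pvVtx] at hr
    | cons e p' =>
      obtain ⟨he, heu, hw'⟩ := hw
      have hr' : e.2.1 :: pvVtx p' = l1 ++ x :: r := by
        simpa [pvVtx] using hr
      obtain ⟨p1, p2, rfl, hlen, hw1, hw2, hvtx⟩ := ih x r e.2.1 v p' hw' hr'
      exact ⟨e :: p1, p2, rfl, by simp [hlen], ⟨he, heu, hw1⟩, hw2, hvtx⟩

theorem pvTrace_lt {E : List (Nat × Nat × Int)} {N : Nat}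
    (hV : ∀ e ∈ E, e.1 < N ∧ e.2.1 < N) :
    ∀ (p : List (Nat × Nat × Int)) (u v : Nat), PvWalk E u p v → u < N →
    ∀ y ∈ u :: pvVtx p, y < N := by
  intro p
  induction p with
  | nil => intro u v _ hu y hy; simp [pvVtx] at hy; omega
  | cons e p ih =>
    intro u v hw hu y hy
    obtain ⟨he, heu, hw'⟩ := hw
    rcases List.mem_cons.mp hy with rfl | hy'
    · exact hu
    · exact ih e.2.1 v hw' (hV e he).2 y (by simpa [pvVtx] using hy')

theorem pvEdge_mem_trace {E : List (Nat × Nat × Int)} :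
    ∀ (p : List (Nat × Nat × Int)) (u v : Nat), PvWalk E u p v → ∀ e ∈ p,
    e.1 ∈ u :: pvVtx p ∧ e.2.1 ∈ u :: pvVtx p := by
  intro p
  induction p with
  | nil => intro u v _ e he; exact absurd he (by simp)
  | cons e0 p ih =>
    intro u v hw e he
    obtain ⟨he0, heu, hw'⟩ := hw
    have hsub : ∀ y : Nat, y ∈ e0.2.1 :: pvVtx p → y ∈ u :: pvVtx (e0 :: p) := by
      intro y hy
      rcases List.mem_cons.mp hy with rfl | hy'
      · simp
      · simp [hy']
    rcases List.mem_cons.mp he with rfl | htl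
    · exact ⟨by rw [heu]; simp, hsub _ (by simp)⟩
    · obtain ⟨h1, h2⟩ := ih e0.2.1 v hw' e htl
      exact ⟨hsub _ h1, hsub _ h2⟩

theorem pvRotate {E : List (Nat × Nat × Int)} {x : Nat} {c : List (Nat × Nat × Int)}
    (hw : PvWalk E x c x) {y : Nat} (hy : y ∈ x :: pvVtx c) :
    ∃ c', PvWalk E y c' y ∧ pvWt c' = pvWt c ∧ c'.length = c.length := by
  obtain ⟨l1, r, heq⟩ := List.mem_iff_append.mp hy
  obtain ⟨p1, p2, rfl, _, hw1, hw2, _⟩ := pvWalk_trace_split l1 y r x x c hw heq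
  refine ⟨p2 ++ p1, pvWalk_append p2 p1 y x y hw2 hw1, by simp; omega, by simp; omega⟩

-- ---- removing cycles: every walk shortens to length < N ----

theorem pvShorten {E : List (Nat × Nat × Int)} {N : Nat}
    (hV : ∀ e ∈ E, e.1 < N ∧ e.2.1 < N) (hN : 1 ≤ N) :
    ∀ (L : Nat) (p : List (Nat × Nat × Int)) (u v : Nat), p.length ≤ L → PvWalk E u p v →
    ∃ q, PvWalk E u q v ∧ q.length ≤ N - 1 ∧ (pvWt q ≤ pvWt p ∨ PvNegCyc E) := by
  intro L
  induction L with
  | zero =>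
    intro p u v hl hw
    have : p = [] := List.length_eq_zero_iff.mp (Nat.le_zero.mp hl)
    subst this
    exact ⟨[], hw, by omega, Or.inl le_rfl⟩
  | succ L ih =>
    intro p u v hl hw
    by_cases hshort : p.length ≤ N - 1
    · exact ⟨p, hw, hshort, Or.inl le_rfl⟩
    · have hplen : N ≤ p.length := by omega
      have hpne : p ≠ [] := by intro h; subst h; simp at hplen; omega
      have hu : u < N := by
        cases p with
        | nil => exact absurd rfl hpne
        | cons e p' => obtain ⟨he, heu, _⟩ := hw; rw [← heu]; exact (hV e he).1
      have htr : ¬ (u :: pvVtx p).Nodup := by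
        intro hnd
        have := pvNodup_length_le (u :: pvVtx p) (pvTrace_lt hV p u v hw hu) hnd
        simp [pvVtx] at this
        omega
      obtain ⟨l1, x, l2, l3, heq⟩ := pvNot_nodup_split _ htr
      rw [List.append_assoc] at heq
      obtain ⟨p1, p23, rfl, hlen1, hw1, hw23, hvtx23⟩ :=
        pvWalk_trace_split l1 x (l2 ++ x :: l3) u v p hw (by simpa using heq)
      have heq2 : x :: pvVtx p23 = (x :: l2) ++ x :: l3 := by simp [hvtx23]
      obtain ⟨p2, p3, rfl, hlen2, hw2, hw3, _⟩ :=
        pvWalk_trace_split (x :: l2) x l3 x v p23 hw23 heq2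
      have hp2ne : p2 ≠ [] := by
        intro h; subst h; simp at hlen2
      have hq0 : PvWalk E u (p1 ++ p3) v := pvWalk_append p1 p3 u x v hw1 hw3
      have hq0len : (p1 ++ p3).length ≤ L := by
        have : 1 ≤ p2.length := List.length_pos_iff.mpr hp2ne
        simp at hl ⊢
        omega
      obtain ⟨q, hqw, hqlen, hqwt⟩ := ih (p1 ++ p3) u v hq0len hq0
      refine ⟨q, hqw, hqlen, ?_⟩
      by_cases hneg : pvWt p2 < 0
      · exact Or.inr ⟨x, p2, hp2ne, hw2, hneg⟩
      · rcases hqwt with h | h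
        · left; simp at h ⊢; omega
        · exact Or.inr h

-- ---- the two key facts about n-1 rounds + one pass ----

theorem pvStable_after {E : List (Nat × Nat × Int)} {d0 : List (Option Int)}
    (hV : ∀ e ∈ E, e.1 < d0.length ∧ e.2.1 < d0.length)
    (h0 : ∀ v, pvG d0 v = none ∨ pvG d0 v = some 0)
    (hnc : ¬ PvNegCyc E) :
    ∀ e ∈ E, ¬ PvFire (pvRounds (d0.length - 1) d0 E) e := by
  intro e he hfire
  obtain ⟨u, v, w⟩ := e
  have hN : 1 ≤ d0.length := by have := (hV _ he).2; omega
  rw [PvFire] at hfire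
  cases hu : pvG (pvRounds (d0.length - 1) d0 E) u with
  | none => rw [hu] at hfire; exact hfire
  | some a =>
    rw [hu] at hfire
    obtain ⟨s, p, hs0, hwp, hwt⟩ := pvWInv_rounds h0 (d0.length - 1) u a hu
    have hwv : PvWalk E s (p ++ [(u, v, w)]) v :=
      pvWalk_append p [(u, v, w)] s u v hwp (pvWalk_single he)
    obtain ⟨q, hqw, hqlen, hqwt⟩ :=
      pvShorten hV hN (p ++ [(u, v, w)]).length (p ++ [(u, v, w)]) s v le_rfl hwv
    have hqwt' : pvWt q ≤ a + w := by
      rcases hqwt with h | h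
      · simp at h; omega
      · exact absurd h hnc
    have hup := pvUpper_bound (fun e' he' => (hV e' he').2) hs0 (d0.length - 1) q v hqw hqlen
    obtain ⟨b, hb, hble⟩ := pvOle_some_elim hup
    rw [hb] at hfire
    simp at hfire
    omega

theorem pvChanged_negcyc {E : List (Nat × Nat × Int)} {d0 : List (Option Int)}
    (hV : ∀ e ∈ E, e.1 < d0.length ∧ e.2.1 < d0.length)
    (h0 : ∀ v, pvG d0 v = none ∨ pvG d0 v = some 0)
    (hch : (pvPass E (pvRounds (d0.length - 1) d0 E) false).2 = true) : PvNegCyc E := by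
  by_contra hnc
  rw [pvPass_of_stable E _ false (pvStable_after hV h0 hnc)] at hch
  exact absurd hch (by simp)

theorem pvDetect {E : List (Nat × Nat × Int)} {d0 : List (Option Int)} {s x : Nat}
    (hV : ∀ e ∈ E, e.1 < d0.length ∧ e.2.1 < d0.length)
    (hs0 : pvG d0 s = some 0)
    {p c : List (Nat × Nat × Int)} (hp : PvWalk E s p x)
    (hc : PvWalk E x c x) (hcne : c ≠ []) (hcw : pvWt c < 0) :
    (pvPass E (pvRounds (d0.length - 1) d0 E) false).2 = true := by
  by_contra hch
  have hch' : (pvPass E (pvRounds (d0.length - 1) d0 E) false).2 = false := by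
    simpa using hch
  have hstb := (pvPass_false_elim E _ false hch').2.2
  have hN : 1 ≤ d0.length := by
    cases c with
    | nil => exact absurd rfl hcne
    | cons e c' => have := (hV e hc.1).2; omega
  obtain ⟨q, hqw, hqlen, _⟩ := pvShorten hV hN p.length p s x le_rfl hp
  have hup := pvUpper_bound (fun e' he' => (hV e' he').2) hs0 (d0.length - 1) q x hqw hqlen
  obtain ⟨a, ha, _⟩ := pvOle_some_elim hup
  have := pvCycle_nonneg hstb hc ha
  omega


-- ---- bridging Python's (possibly negative, in-range) indexing to the Nat model ----

theorem pvNi_lt {n i : Int} (h1 : -n ≤ i) (h2 : i < n) : pvNi n i < n.toNat := by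
  unfold pvNi; split_ifs <;> omega

theorem pvNi_of_nonneg {n i : Int} (h : 0 ≤ i) : pvNi n i = i.toNat := by
  unfold pvNi; rw [if_neg (by omega)]

theorem pvGetBridge {α : Type} (d : List α) (dflt : α) (i n : Int) (h1 : -n ≤ i) (h2 : i < n)
    (hlen : d.length = n.toNat) : PySem.List.pyGetD d i dflt = d.getD (pvNi n i) dflt := by
  have hn : 0 < n := by omega
  by_cases hi : i < 0
  · simp only [PySem.List.pyGetD, PySem.List.pyGet?, PySem.List.pyIdx?, pvNi,
      if_neg (by omega : ¬ 0 ≤ i), if_pos hi, if_pos (show -(d.length:Int) ≤ i by omega)]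
    have : (i + n).toNat = d.length - (-i).toNat := by omega
    simp [List.getD, this]
  · simp only [PySem.List.pyGetD, PySem.List.pyGet?, PySem.List.pyIdx?, pvNi,
      if_pos (by omega : 0 ≤ i), if_neg hi, if_pos (show i < (d.length:Int) by omega)]
    simp [List.getD]

theorem pvSetBridge {α : Type} (d : List α) (x : α) (i n : Int) (h1 : -n ≤ i) (h2 : i < n)
    (hlen : d.length = n.toNat) : PySem.List.pySetD d i x = d.set (pvNi n i) x := by
  have hn : 0 < n := by omega
  by_cases hi : i < 0
  · simp only [PySem.List.pySetD, PySem.List.pySet?, PySem.List.pyIdx?, pvNi,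
      if_neg (by omega : ¬ 0 ≤ i), if_pos hi, if_pos (show -(d.length:Int) ≤ i by omega)]
    have : (i + n).toNat = d.length - (-i).toNat := by omega
    simp [this]
  · simp only [PySem.List.pySetD, PySem.List.pySet?, PySem.List.pyIdx?, pvNi,
      if_pos (by omega : 0 ≤ i), if_neg hi, if_pos (show i < (d.length:Int) by omega)]
    simp

/-- In-range condition for all endpoints of an edge list. -/
def PvInR (n : Int) (es : List (Int × Int × Int)) : Prop :=
  ∀ e ∈ es, -n ≤ e.1 ∧ e.1 < n ∧ -n ≤ e.2.1 ∧ e.2.1 < n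

theorem pvInR_valid {n : Int} {es : List (Int × Int × Int)} (h : PvInR n es) :
    ∀ e ∈ es.map (pvNrm n), e.1 < n.toNat ∧ e.2.1 < n.toNat := by
  intro e he
  obtain ⟨e0, he0, rfl⟩ := List.mem_map.mp he
  obtain ⟨ha, hb, hc, hd⟩ := h e0 he0
  exact ⟨pvNi_lt ha hb, pvNi_lt hc hd⟩

-- A's relax is the clean pass over the normalized edges
theorem pvRelaxBridge {n : Int} : ∀ (es : List (Int × Int × Int)) (d : List (Option Int)) (c : Bool),
    PvInR n es → d.length = n.toNat → pyRelax es d c = pvPass (es.map (pvNrm n)) d c := by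
  intro es
  induction es with
  | nil => intro d c _ _; rfl
  | cons e es ih =>
    intro d c hr hlen
    obtain ⟨f, t, w⟩ := e
    obtain ⟨h1, h2, h3, h4⟩ := hr (f, t, w) (by simp)
    have hr' : PvInR n es := fun e he => hr e (by simp [he])
    simp only [pyRelax, List.map_cons, pvNrm, pvPass, pvG]
    rw [pvGetBridge d none f n h1 h2 hlen, pvGetBridge d none t n h3 h4 hlen]
    cases hu : d.getD (pvNi n f) none with
    | none => simp only [hu]; exact ih d c hr' hlen
    | some a =>
      simp only [hu]
      cases hv : d.getD (pvNi n t) none with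
      | none =>
        simp only [hv]
        rw [pvSetBridge d (some (a + w)) t n h3 h4 hlen]
        exact ih _ true hr' (by simp [hlen])
      | some b =>
        simp only [hv]
        by_cases hlt : a + w < b
        · rw [if_pos hlt, if_pos hlt, pvSetBridge d (some (a + w)) t n h3 h4 hlen]
          exact ih _ true hr' (by simp [hlen])
        · rw [if_neg hlt, if_neg hlt]
          exact ih d c hr' hlen

theorem pvRoundsBridge {n : Int} {es : List (Int × Int × Int)} (hr : PvInR n es) :
    ∀ (k : Nat) (d : List (Option Int)), d.length = n.toNat →
    pyRounds k d es = pvRounds k d (es.map (pvNrm n)) := by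
  intro k
  induction k with
  | zero => intro d _; rfl
  | succ k ih =>
    intro d hlen
    rw [pyRounds, pvRounds, pvRelaxBridge es d false hr hlen]
    exact ih _ (by rw [pvPass_length]; exact hlen)

-- B's pass is the clean pass on the all-finite distance list
theorem pvPassBridge {n : Int} : ∀ (es : List (Int × Int × Int)) (d : List Int) (c : Bool),
    PvInR n es → d.length = n.toNat →
    pvPass (es.map (pvNrm n)) (d.map some) c = ((pyPass es d c).1.map some, (pyPass es d c).2) := by
  intro es
  induction es with
  | nil => intro d c _ _; rfl
  | cons e es ih =>
    intro d c hr hlen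
    obtain ⟨f, t, w⟩ := e
    obtain ⟨h1, h2, h3, h4⟩ := hr (f, t, w) (by simp)
    have hr' : PvInR n es := fun e he => hr e (by simp [he])
    have hfl : pvNi n f < d.length := by rw [hlen]; exact pvNi_lt h1 h2
    have htl : pvNi n t < d.length := by rw [hlen]; exact pvNi_lt h3 h4
    have hgf : pvG (d.map some) (pvNi n f) = some (d.getD (pvNi n f) 0) := by
      simp [pvG, List.getD, List.getElem?_eq_getElem, hfl]
    have hgt : pvG (d.map some) (pvNi n t) = some (d.getD (pvNi n t) 0) := by
      simp [pvG, List.getD, List.getElem?_eq_getElem, htl]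
    simp only [List.map_cons, pvNrm, pvPass, pyPass]
    rw [hgf, hgt]
    simp only
    rw [pvGetBridge d 0 f n h1 h2 hlen, pvGetBridge d 0 t n h3 h4 hlen]
    by_cases hlt : d.getD (pvNi n f) 0 + w < d.getD (pvNi n t) 0
    · rw [if_pos hlt, if_pos hlt]
      rw [pvSetBridge d (d.getD (pvNi n f) 0 + w) t n h3 h4 hlen]
      rw [← List.map_set]
      exact ih _ true hr' (by simp [hlen])
    · rw [if_neg hlt, if_neg hlt]
      exact ih d c hr' hlen


-- ---- assembling B: alt = true ↔ negative cycle ----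

theorem pvG_replicate_some (N v : Nat) :
    pvG (List.replicate N (some (0:Int))) v = if v < N then some 0 else none := by
  by_cases h : v < N
  · simp [pvG, List.getD, List.getElem?_replicate, h]
  · simp [pvG, List.getD, List.getElem?_replicate, h]

theorem pvG_map_some {d : List Int} {v : Nat} (h : v < d.length) :
    pvG (d.map some) v = some (d.getD v 0) := by
  simp [pvG, List.getD, List.getElem?_eq_getElem, h]

theorem pyPass_length : ∀ (es : List (Int × Int × Int)) (d : List Int) (c : Bool),
    (pyPass es d c).1.length = d.length := by
  intro es
  induction es with
  | nil => intro d c; rfl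
  | cons e es ih =>
    intro d c
    obtain ⟨u, v, w⟩ := e
    simp only [pyPass]
    by_cases hlt : PySem.List.pyGetD d u 0 + w < PySem.List.pyGetD d v 0
    · rw [if_pos hlt, ih, PySem.List.length_pySetD]
    · rw [if_neg hlt]; exact ih d c

theorem pvCycStart_lt {n : Int} {edges : List (Int × Int × Int)} (hr : PvInR n edges)
    {x : Nat} {c : List (Nat × Nat × Int)} (hw : PvWalk (edges.map (pvNrm n)) x c x)
    (hcne : c ≠ []) : x < n.toNat := by
  cases c with
  | nil => exact absurd rfl hcne
  | cons e c' =>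
    obtain ⟨he, heu, _⟩ := hw
    rw [← heu]
    exact (pvInR_valid hr e he).1

theorem pvB_true_of_NC {n : Int} {edges : List (Int × Int × Int)} (hr : PvInR n edges)
    (hnc : PvNegCyc (edges.map (pvNrm n))) :
    ∀ (k : Nat) (d : List Int), d.length = n.toNat → pyLoopB k d edges = true := by
  obtain ⟨x, c, hcne, hw, hneg⟩ := hnc
  have hchanged : ∀ (d : List Int), d.length = n.toNat → (pyPass edges d false).2 = true := by
    intro d hlen
    by_contra hch
    have hch' : (pvPass (edges.map (pvNrm n)) (d.map some) false).2 = false := by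
      rw [pvPassBridge edges d false hr hlen]
      simpa using hch
    have hstb := (pvPass_false_elim _ _ false hch').2.2
    have hx : x < d.length := by rw [hlen]; exact pvCycStart_lt hr hw hcne
    have := pvCycle_nonneg hstb hw (pvG_map_some hx)
    omega
  intro k
  induction k with
  | zero => intro d hlen; exact hchanged d hlen
  | succ k ih =>
    intro d hlen
    simp only [pyLoopB]
    rw [if_pos (hchanged d hlen)]
    exact ih _ (by rw [pyPass_length]; exact hlen)

theorem pvB_clean {n : Int} {edges : List (Int × Int × Int)} (hr : PvInR n edges) :
    ∀ (k : Nat) (d : List Int), d.length = n.toNat → pyLoopB k d edges = true →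
    (pvPass (edges.map (pvNrm n)) (pvRounds k (d.map some) (edges.map (pvNrm n))) false).2 = true := by
  intro k
  induction k with
  | zero =>
    intro d hlen h
    rw [pvRounds]
    rw [pvPassBridge edges d false hr hlen]
    exact h
  | succ k ih =>
    intro d hlen h
    simp only [pyLoopB] at h
    by_cases hc : (pyPass edges d false).2 = true
    · rw [if_pos hc] at h
      have := ih (pyPass edges d false).1 (by rw [pyPass_length]; exact hlen) h
      rw [pvRounds, pvPassBridge edges d false hr hlen]
      exact this
    · rw [if_neg hc] at h; exact absurd h (by simp)

theorem pvB_iff {n : Int} {edges : List (Int × Int × Int)} (hn : 0 < n) (hr : PvInR n edges) :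
    (has_negative_weight_cycle_alt n edges = true ↔ PvNegCyc (edges.map (pvNrm n))) := by
  unfold has_negative_weight_cycle_alt
  rw [if_neg (by omega)]
  constructor
  · intro h
    have hch := pvB_clean hr (n - 1).toNat (List.replicate n.toNat 0) (by simp) h
    rw [List.map_replicate] at hch
    have hlen0 : (List.replicate n.toNat (some (0:Int))).length = n.toNat := by simp
    have hk : (n - 1).toNat = (List.replicate n.toNat (some (0:Int))).length - 1 := by
      rw [hlen0]; omega
    rw [hk] at hch
    refine pvChanged_negcyc ?_ ?_ hch
    · intro e he
      have := pvInR_valid hr e he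
      omega
    · intro v
      rw [pvG_replicate_some]
      split_ifs <;> simp
  · intro hnc
    exact pvB_true_of_NC hr hnc (n - 1).toNat (List.replicate n.toNat 0) (by simp)

theorem pvB_nonpos {n : Int} (edges : List (Int × Int × Int)) (hn : n ≤ 0) :
    has_negative_weight_cycle_alt n edges = false := by
  unfold has_negative_weight_cycle_alt
  rw [if_pos hn]


-- ---- assembling A: per-source Bellman-Ford, clean characterization ----

def pvD0 (n s : Int) : List (Option Int) :=
  (List.replicate n.toNat (none : Option Int)).set s.toNat (some 0)

def pvDk (n : Int) (es : List (Int × Int × Int)) (s : Int) : List (Option Int) :=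
  pvRounds (n.toNat - 1) (pvD0 n s) (es.map (pvNrm n))

def pvDfin (n : Int) (es : List (Int × Int × Int)) (s : Int) : List (Option Int) :=
  (pvPass (es.map (pvNrm n)) (pvDk n es s) false).1

def pvChg (n : Int) (es : List (Int × Int × Int)) (s : Int) : Bool :=
  (pvPass (es.map (pvNrm n)) (pvDk n es s) false).2

def pvReach (n : Int) (es : List (Int × Int × Int)) (s : Int) : List Int :=
  (PySem.List.pyRange 0 n 1).filter (fun v => ((pvDfin n es s).getD (pvNi n v) none).isSome)

@[simp] theorem pvD0_length (n s : Int) : (pvD0 n s).length = n.toNat := by simp [pvD0]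

@[simp] theorem pvDfin_length (n : Int) (es : List (Int × Int × Int)) (s : Int) :
    (pvDfin n es s).length = n.toNat := by
  simp [pvDfin, pvDk, pvPass_length, pvRounds_length]

theorem pvG_replicate_none (N v : Nat) : pvG (List.replicate N (none : Option Int)) v = none := by
  by_cases h : v < N
  · simp [pvG, List.getD, List.getElem?_replicate, h]
  · simp [pvG, List.getD, List.getElem?_replicate, h]

theorem pvD0_shape (n s : Int) : ∀ v, pvG (pvD0 n s) v = none ∨ pvG (pvD0 n s) v = some 0 := by
  intro v
  by_cases hv : v = s.toNat
  · subst hv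
    by_cases hlt : s.toNat < n.toNat
    · right; rw [pvD0, pvG_set_self (by simpa using hlt)]
    · left
      rw [pvD0, List.set_eq_of_length_le (by simpa using Nat.le_of_not_lt hlt)]
      exact pvG_replicate_none _ _
  · left; rw [pvD0, pvG_set_ne hv, pvG_replicate_none]

theorem pvD0_self {n s : Int} (h : s.toNat < n.toNat) : pvG (pvD0 n s) s.toNat = some 0 := by
  rw [pvD0, pvG_set_self (by simpa using h)]

theorem pvD0_unique {n s : Int} {v : Nat} {a : Int} (h : pvG (pvD0 n s) v = some a) :
    v = s.toNat := by
  by_contra hne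
  rw [pvD0, pvG_set_ne hne, pvG_replicate_none] at h
  cases h

-- the port's from-source routine, re-expressed over the clean model
theorem pvFrom_eq {n : Int} {edges' : List (Int × Int × Int)} {s : Int}
    (hr : PvInR n edges') (h0 : 0 ≤ s) (h1 : s < n) :
    pyFromSource n edges' s = (pvChg n edges' s, pvReach n edges' s) := by
  have hn : 0 < n := by omega
  have hd0 : PySem.List.pySetD (List.replicate n.toNat (none : Option Int)) s (some 0) = pvD0 n s := by
    rw [pvD0]
    exact PySem.List.pySetD_of_nonneg _ _ h0
  have hk : (n - 1).toNat = n.toNat - 1 := by omega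
  have hrel : pyRounds (n - 1).toNat (pvD0 n s) edges' = pvDk n edges' s := by
    rw [hk, pvDk]
    exact pvRoundsBridge hr _ _ (by simp)
  have hfin : pyRelax edges' (pvDk n edges' s) false =
      (pvDfin n edges' s, pvChg n edges' s) := by
    rw [pvRelaxBridge edges' _ false hr (by simp [pvDk, pvRounds_length])]
    rfl
  simp only [pyFromSource, hd0, hrel, hfin]
  refine Prod.ext rfl ?_
  simp only [pvReach]
  refine List.filter_congr ?_
  intro v hv
  obtain ⟨hv0, hv1⟩ := (PySem.List.mem_pyRange_one).mp hv
  rw [pvGetBridge (pvDfin n edges' s) none v n (by omega) hv1 (by simp)]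

theorem pvReach_mem {n : Int} {es : List (Int × Int × Int)} {s v : Int} :
    v ∈ pvReach n es s ↔ (0 ≤ v ∧ v < n) ∧ ((pvDfin n es s).getD (pvNi n v) none).isSome := by
  rw [pvReach, List.mem_filter, PySem.List.mem_pyRange_one]

theorem pvReach_self {n : Int} {es : List (Int × Int × Int)} {s : Int}
    (h0 : 0 ≤ s) (h1 : s < n) : s ∈ pvReach n es s := by
  rw [pvReach_mem]
  refine ⟨⟨h0, h1⟩, ?_⟩
  have hlt : s.toNat < n.toNat := by omega
  have hmono : PvOle (pvG (pvDfin n es s) s.toNat) (pvG (pvD0 n s) s.toNat) := by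
    refine pvOle_trans (pvPass_mono _ _ false s.toNat) (pvRounds_mono _ _ _ s.toNat)
  rw [pvD0_self hlt] at hmono
  obtain ⟨x, hx, _⟩ := pvOle_some_elim hmono
  rw [pvNi_of_nonneg h0]
  change (pvG (pvDfin n es s) s.toNat).isSome
  rw [hx]; rfl

theorem pvReach_walk {n : Int} {es : List (Int × Int × Int)} {s v : Int}
    (hv : v ∈ pvReach n es s) :
    ∃ p, PvWalk (es.map (pvNrm n)) s.toNat p (pvNi n v) := by
  rw [pvReach_mem] at hv
  obtain ⟨_, hsome⟩ := hv
  cases ha : (pvDfin n es s).getD (pvNi n v) none with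
  | none => rw [ha] at hsome; cases hsome
  | some a =>
    have hwinv : PvWInv (es.map (pvNrm n)) (pvD0 n s) (pvDfin n es s) := by
      rw [pvDfin]
      exact pvWInv_pass (fun e he => he) _ false (pvWInv_rounds (pvD0_shape n s) _)
    obtain ⟨s', p, hs', hw, _⟩ := hwinv (pvNi n v) a ha
    rw [pvD0_unique hs'] at hw
    exact ⟨p, hw⟩

theorem pvChg_negcyc {n : Int} {es : List (Int × Int × Int)} {s : Int}
    (hr : PvInR n es) (hch : pvChg n es s = true) : PvNegCyc (es.map (pvNrm n)) := by
  have hk : n.toNat - 1 = (pvD0 n s).length - 1 := by simp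
  rw [pvChg, pvDk, hk] at hch
  refine pvChanged_negcyc ?_ (pvD0_shape n s) hch
  intro e he
  have := pvInR_valid hr e he
  simpa using this

theorem pvDetect_inst {n : Int} {es : List (Int × Int × Int)} {s : Int}
    (hr : PvInR n es) {x : Nat} (hwalk : ∃ p, PvWalk (es.map (pvNrm n)) s.toNat p x)
    {c : List (Nat × Nat × Int)} (hc : PvWalk (es.map (pvNrm n)) x c x) (hcne : c ≠ [])
    (hcw : pvWt c < 0) (hs : s.toNat < n.toNat) : pvChg n es s = true := by
  obtain ⟨p, hp⟩ := hwalk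
  have hk : n.toNat - 1 = (pvD0 n s).length - 1 := by simp
  rw [pvChg, pvDk, hk]
  refine pvDetect ?_ (pvD0_self hs) hp hc hcne hcw
  intro e he
  have := pvInR_valid hr e he
  simpa using this

theorem pvFilter_cons_length {α : Type} (p : α → Bool) (a : α) (l : List α)
    (h : p a = false) : ((a :: l).filter p).length ≤ l.length := by
  simp [List.filter_cons, h]
  exact List.length_filter_le p l

-- walk membership upgrade along a sub-edge-set
theorem pvWalk_of_edges {E E2 : List (Nat × Nat × Int)} :
    ∀ (p : List (Nat × Nat × Int)) (u v : Nat), PvWalk E u p v → (∀ e ∈ p, e ∈ E2) →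
    PvWalk E2 u p v := by
  intro p
  induction p with
  | nil => intro u v h _; exact h
  | cons e p ih =>
    intro u v h hmem
    obtain ⟨_, hu, hw⟩ := h
    exact ⟨hmem e (by simp), hu, ih _ v hw (fun e' he' => hmem e' (by simp [he']))⟩

-- ---- the outer source loop ----

theorem pvLoopA_sound {n : Int} :
    ∀ (fuel : Nat) (edges' : List (Int × Int × Int)) (srcs : List Int),
    PvInR n edges' → (∀ v ∈ srcs, 0 ≤ v ∧ v < n) →
    pyLoopA fuel n edges' srcs = true → PvNegCyc (edges'.map (pvNrm n)) := by
  intro fuel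
  induction fuel with
  | zero => intro edges' srcs _ _ h; exact absurd h (by simp [pyLoopA])
  | succ fuel ih =>
    intro edges' srcs hr hsrcs h
    cases srcs with
    | nil => exact absurd h (by simp [pyLoopA])
    | cons s rest =>
      obtain ⟨hs0, hs1⟩ := hsrcs s (by simp)
      simp only [pyLoopA] at h
      rw [pvFrom_eq hr hs0 hs1] at h
      by_cases hch : pvChg n edges' s = true
      · exact pvChg_negcyc hr hch
      · rw [if_neg hch] at h
        have hr' : PvInR n (edges'.filter fun e =>
            !((pvReach n edges' s).contains e.1) && !((pvReach n edges' s).contains e.2.1)) :=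
          fun e he => hr e (List.mem_of_mem_filter he)
        have hsrcs' : ∀ v ∈ (s :: rest).filter (fun v => !((pvReach n edges' s).contains v)),
            0 ≤ v ∧ v < n := fun v hv => hsrcs v (List.mem_of_mem_filter hv)
        have hnc := ih _ _ hr' hsrcs' h
        refine pvNegCyc_subset ?_ hnc
        intro e he
        obtain ⟨e0, he0, rfl⟩ := List.mem_map.mp he
        exact List.mem_map.mpr ⟨e0, List.mem_of_mem_filter he0, rfl⟩

theorem pvLoopA_complete {n : Int} :
    ∀ (fuel : Nat) (edges' : List (Int × Int × Int)) (srcs : List Int)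
    (x : Nat) (c : List (Nat × Nat × Int)),
    PvInR n edges' → (∀ v ∈ srcs, 0 ≤ v ∧ v < n) → srcs.length ≤ fuel →
    PvWalk (edges'.map (pvNrm n)) x c x → c ≠ [] → pvWt c < 0 →
    (∀ y ∈ x :: pvVtx c, ∃ sv ∈ srcs, pvNi n sv = y) →
    pyLoopA fuel n edges' srcs = true := by
  intro fuel
  induction fuel with
  | zero =>
    intro edges' srcs x c _ _ hfuel _ _ _ htr
    obtain ⟨sv, hsv, _⟩ := htr x (by simp)
    rw [List.length_eq_zero_iff.mp (Nat.le_zero.mp hfuel)] at hsv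
    exact absurd hsv (by simp)
  | succ fuel ih =>
    intro edges' srcs x c hr hsrcs hfuel hw hcne hcw htr
    cases srcs with
    | nil =>
      obtain ⟨sv, hsv, _⟩ := htr x (by simp)
      exact absurd hsv (by simp)
    | cons s rest =>
      obtain ⟨hs0, hs1⟩ := hsrcs s (by simp)
      have hsN : s.toNat < n.toNat := by omega
      simp only [pyLoopA]
      rw [pvFrom_eq hr hs0 hs1]
      by_cases hch : pvChg n edges' s = true
      · rw [if_pos hch]
      · -- the pass from s found nothing: no cycle vertex is reachable from s
        have key1 : ∀ rv ∈ pvReach n edges' s, pvNi n rv ∉ x :: pvVtx c := by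
          intro rv hrv hmem
          obtain ⟨p, hp⟩ := pvReach_walk hrv
          obtain ⟨c', hc', hcw', hlen'⟩ := pvRotate hw hmem
          have hc'ne : c' ≠ [] := by
            intro hnil
            rw [hnil] at hlen'
            exact hcne (List.length_eq_zero_iff.mp hlen'.symm)
          exact hch (pvDetect_inst hr ⟨p, hp⟩ hc' hc'ne (by omega) hsN)
        rw [if_neg hch]
        -- every edge of the cycle survives the filtering
        have hsurv : ∀ e ∈ c, e ∈ (edges'.filter fun e =>
            !((pvReach n edges' s).contains e.1) && !((pvReach n edges' s).contains e.2.1)).map (pvNrm n) := by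
          intro e he
          have heE : e ∈ edges'.map (pvNrm n) := pvWalk_edge_mem c x x hw e he
          obtain ⟨e0, he0, rfl⟩ := List.mem_map.mp heE
          obtain ⟨htr1, htr2⟩ := pvEdge_mem_trace c x x hw _ he
          refine List.mem_map.mpr ⟨e0, List.mem_filter.mpr ⟨he0, ?_⟩, rfl⟩
          simp only [Bool.and_eq_true, Bool.not_eq_eq_eq_not, Bool.not_true, List.contains_eq_mem,
            decide_eq_false_iff_not]
          constructor
          · intro hc1
            exact key1 e0.1 hc1 htr1
          · intro hc2
            exact key1 e0.2.1 hc2 htr2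
        have hw' : PvWalk ((edges'.filter fun e =>
            !((pvReach n edges' s).contains e.1) && !((pvReach n edges' s).contains e.2.1)).map (pvNrm n)) x c x :=
          pvWalk_of_edges c x x hw hsurv
        have hr' : PvInR n (edges'.filter fun e =>
            !((pvReach n edges' s).contains e.1) && !((pvReach n edges' s).contains e.2.1)) :=
          fun e he => hr e (List.mem_of_mem_filter he)
        have hsrcs' : ∀ v ∈ (s :: rest).filter (fun v => !((pvReach n edges' s).contains v)),
            0 ≤ v ∧ v < n := fun v hv => hsrcs v (List.mem_of_mem_filter hv)
        have hfilterlen : ((s :: rest).filter (fun v => !((pvReach n edges' s).contains v))).length ≤ fuel := by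
          have hsmem : s ∈ pvReach n edges' s := pvReach_self hs0 hs1
          refine le_trans (pvFilter_cons_length _ s rest ?_) (by simpa using hfuel)
          simp [List.contains_eq_mem, hsmem]
        have htr' : ∀ y ∈ x :: pvVtx c, ∃ sv ∈ (s :: rest).filter
            (fun v => !((pvReach n edges' s).contains v)), pvNi n sv = y := by
          intro y hy
          obtain ⟨sv, hsv, hni⟩ := htr y hy
          refine ⟨sv, List.mem_filter.mpr ⟨hsv, ?_⟩, hni⟩
          simp only [Bool.not_eq_eq_eq_not, Bool.not_true, List.contains_eq_mem,
            decide_eq_false_iff_not]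
          intro hmem
          exact key1 sv hmem (hni ▸ hy)
        exact ih _ _ x c hr' hsrcs' hfilterlen hw' hcne hcw htr'


-- ---- top-level equivalences ----

theorem pvA_nonpos {n : Int} (edges : List (Int × Int × Int)) (hn : n ≤ 0) :
    has_negative_weight_cycle n edges = false := by
  unfold has_negative_weight_cycle
  have h : n.toNat = 0 := by omega
  rw [h]
  rfl

theorem pvA_iff {n : Int} {edges : List (Int × Int × Int)} (hn : 0 < n) (hr : PvInR n edges) :
    (has_negative_weight_cycle n edges = true ↔ PvNegCyc (edges.map (pvNrm n))) := by
  constructor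
  · intro h
    refine pvLoopA_sound n.toNat edges _ hr ?_ h
    intro v hv
    exact PySem.List.mem_pyRange_one.mp hv
  · rintro ⟨x, c, hcne, hw, hcw⟩
    have hV := pvInR_valid hr
    have hx : x < n.toNat := pvCycStart_lt hr hw hcne
    refine pvLoopA_complete n.toNat edges _ x c hr ?_ ?_ hw hcne hcw ?_
    · intro v hv
      exact PySem.List.mem_pyRange_one.mp hv
    · rw [PySem.List.length_pyRange_one]
      omega
    · intro y hy
      have hyN : y < n.toNat := pvTrace_lt hV c x x hw hx y hy
      refine ⟨(y : Int), ?_, ?_⟩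
      · rw [PySem.List.mem_pyRange_one]
        omega
      · rw [pvNi_of_nonneg (by positivity)]
        simp

-- ===== VERDICT (by name: the statement is the Claim_ definition above) =====
theorem has_negative_weight_cycle_spec : Claim_equal_has_negative_weight_cycle := by
  intro n edges _hdom hpre
  unfold Spec_has_negative_weight_cycle
  by_cases hn : n ≤ 0
  · rw [pvA_nonpos edges hn, pvB_nonpos edges hn]
  · have hn' : 0 < n := by omega
    have hr : PvInR n edges := by
      rcases hpre with h | h
      · omega
      · exact h
    exact Bool.coe_iff_coe.mp ((pvA_iff hn' hr).trans (pvB_iff hn' hr).symm)
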